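-- pv_equiv track=rewrite | github.com/Shaywei/MyDevTools | Python/topcoder/srm599.py | maxMikan
-- ===== SOURCE A (Python) =====
-- def maxMikan(mikan, weight):
--     mikan = sorted(mikan)
--     ans = 0
--     for i in range(len(mikan)):
--         weight += mikan[i]
--         if weight > 5000:
--             return ans
--         ans += 1
--     return ans
-- ===== SOURCE B (Python) =====
-- def maxMikan(mikan, weight):
--     # Selection-based greedy: no sorting at all. Repeatedly pick the lightest
--     # remaining mikan; stop as soon as adding it would push the weight over 5000.
--     rest = list(mikan)
--     count = 0
--     while rest:
--         m = min(rest)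
--         if weight + m > 5000:
--             break
--         weight += m
--         rest.remove(m)
--         count += 1
--     return count
-- ===== Notes on version B (the rewrite author's own statement) =====
-- stated objective: alternative
-- what changed: Drops the sort entirely: a selection-based greedy that repeatedly extracts the minimum of the remaining multiset (min + remove) and stops at the first would-be exceedance, instead of sorting once and scanning the sorted list with a running sum.
import Mathlib
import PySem

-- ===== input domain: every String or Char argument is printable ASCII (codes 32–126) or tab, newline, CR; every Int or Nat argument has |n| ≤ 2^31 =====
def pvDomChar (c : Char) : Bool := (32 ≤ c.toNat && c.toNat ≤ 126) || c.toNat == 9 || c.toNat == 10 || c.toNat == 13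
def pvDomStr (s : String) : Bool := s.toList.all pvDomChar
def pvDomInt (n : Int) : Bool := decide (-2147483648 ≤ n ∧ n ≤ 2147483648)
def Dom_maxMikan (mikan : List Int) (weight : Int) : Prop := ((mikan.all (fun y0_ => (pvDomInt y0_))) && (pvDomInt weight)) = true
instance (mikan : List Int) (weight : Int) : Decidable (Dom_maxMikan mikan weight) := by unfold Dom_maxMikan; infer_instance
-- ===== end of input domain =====

-- B replaces sort-then-scan by a selection-based greedy (repeated min + remove,
-- no sort); an alternative of different shape (O(n^2) vs O(n log n)), same value.


-- ===== PORT A =====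
-- A's for-loop over the sorted list, carrying (weight, ans), with the early return.
def pvGoA : List Int → Int → Int → Int
  | [], _, ans => ans
  | x :: xs, weight, ans =>
    let weight' := weight + x
    if weight' > 5000 then ans else pvGoA xs weight' (ans + 1)

def maxMikan (mikan : List Int) (weight : Int) : Int :=
  pvGoA (PySem.List.sorted mikan (fun x => x) false) weight 0

-- ===== PORT B =====
-- B's while-loop: min of the remaining list, early break, remove-by-value.
-- rest.remove(m) with m = min(rest) ∈ rest never raises; List.erase removes the
-- first occurrence by value, exactly like Python's list.remove — exact here.
def pvGoB (rest : List Int) (weight count : Int) : Int :=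
  match h : PySem.List.min? rest (fun x => x) with
  | none => count
  | some m =>
    if weight + m > 5000 then count
    else pvGoB (rest.erase m) (weight + m) (count + 1)
termination_by rest.length
decreasing_by
  have hm : m ∈ rest := PySem.List.min?_mem h
  have h1 := List.length_erase_of_mem hm
  have h2 := List.length_pos_of_mem hm
  omega

def maxMikan_alt (mikan : List Int) (weight : Int) : Int :=
  pvGoB mikan weight 0

-- ===== PRECONDITION & SPEC =====
def Spec_maxMikan (mikan : List Int) (weight : Int) (out : Int) : Prop := out = maxMikan_alt mikan weight
instance (mikan : List Int) (weight : Int) (out : Int) : Decidable (Spec_maxMikan mikan weight out) := by unfold Spec_maxMikan; infer_instance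

-- ===== CLAIM (what is proved, stated in full; the proofs are below) =====
def Claim_equal_maxMikan : Prop := ∀ (mikan : List Int) (weight : Int), Dom_maxMikan mikan weight → Spec_maxMikan mikan weight (maxMikan mikan weight)

-- ===== LEMMAS AND PROOFS =====
-- Pulling the minimum to the front: sorted l = m :: sorted (l.erase m).
theorem sorted_cons_min (l : List Int) (m : Int)
    (h : PySem.List.min? l (fun x => x) = some m) :
    PySem.List.sorted l (fun x => x) false
      = m :: PySem.List.sorted (l.erase m) (fun x => x) false := by
  have hm : m ∈ l := PySem.List.min?_mem h
  apply PySem.List.sorted_id_eq_of_perm_of_pairwise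
  · exact ((PySem.List.sorted_perm _ _ _).cons m).trans (l.perm_cons_erase hm).symm
  · refine List.pairwise_cons.mpr ⟨?_, PySem.List.sorted_pairwise _ _⟩
    intro y hy
    have hy' : y ∈ l.erase m := (PySem.List.mem_sorted _ _ _ _).1 hy
    exact PySem.List.min?_isMin h y (List.mem_of_mem_erase hy')

-- B's selection loop computes A's scan of the sorted list.
theorem pvGoB_eq_pvGoA (n : ℕ) : ∀ (l : List Int), l.length = n → ∀ (w a : Int),
    pvGoB l w a = pvGoA (PySem.List.sorted l (fun x => x) false) w a := by
  induction n using Nat.strong_induction_on with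
  | _ n ih =>
    intro l hn w a
    rw [pvGoB.eq_def]
    cases hmin : PySem.List.min? l (fun x => x) with
    | none =>
      have : l = [] := (PySem.List.min?_eq_none_iff _ _).1 hmin
      simp [this, PySem.List.sorted, pvGoA]
    | some m =>
      have hm : m ∈ l := PySem.List.min?_mem hmin
      rw [sorted_cons_min l m hmin]
      simp only [pvGoA]
      by_cases hgt : w + m > 5000
      · simp [hgt]
      · simp only [hgt, if_false]
        have hlt : (l.erase m).length < n := by
          have := List.length_erase_of_mem hm
          have := List.length_pos_of_mem hm
          omega
        exact ih _ hlt (l.erase m) rfl (w + m) (a + 1)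

-- ===== VERDICT (by name: the statement is the Claim_ definition above) =====
theorem maxMikan_spec : Claim_equal_maxMikan := by
  intro mikan weight _
  unfold Spec_maxMikan maxMikan maxMikan_alt
  exact (pvGoB_eq_pvGoA mikan.length mikan rfl weight 0).symm
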